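-- pv_equiv track=rewrite | github.com/HeYuJie2019/bestway | install/sbus_control/lib/python3.10/site-packages/sbus_control/sbus_control_node.py | _build_block_pattern
-- ===== SOURCE A (Python) =====
-- from typing import List, Sequence, Tuple, Optional
--
-- Pixel = Tuple[int, int, int]  # (R, G, B)
--
-- def _build_block_pattern(count: int, color_a: Pixel, color_b: Pixel, block_size: int = 8, phase: int = 0) -> List[Pixel]:
--     bs = max(1, int(block_size))
--     out: List[Pixel] = []
--     toggle = phase & 1
--     i = 0
--     while i < count:
--         color = color_b if toggle else color_a
--         run = min(bs, count - i)
--         out.extend([color] * run)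
--         i += run
--         toggle ^= 1
--     return out
-- ===== SOURCE B (Python) =====
-- from typing import List, Sequence, Tuple, Optional
--
-- Pixel = Tuple[int, int, int]  # (R, G, B)
--
-- def _build_block_pattern(count: int, color_a: Pixel, color_b: Pixel, block_size: int = 8, phase: int = 0) -> List[Pixel]:
--     bs = max(1, int(block_size))
--     return [color_b if ((phase + i // bs) & 1) else color_a for i in range(count)]
-- ===== Notes on version B (the rewrite author's own statement) =====
-- stated objective: simpler
-- what changed: Replaces the run-extending block loop with its flipping toggle by a single per-index comprehension that derives each pixel's block parity directly as (phase + i // bs) & 1.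
import Mathlib
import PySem

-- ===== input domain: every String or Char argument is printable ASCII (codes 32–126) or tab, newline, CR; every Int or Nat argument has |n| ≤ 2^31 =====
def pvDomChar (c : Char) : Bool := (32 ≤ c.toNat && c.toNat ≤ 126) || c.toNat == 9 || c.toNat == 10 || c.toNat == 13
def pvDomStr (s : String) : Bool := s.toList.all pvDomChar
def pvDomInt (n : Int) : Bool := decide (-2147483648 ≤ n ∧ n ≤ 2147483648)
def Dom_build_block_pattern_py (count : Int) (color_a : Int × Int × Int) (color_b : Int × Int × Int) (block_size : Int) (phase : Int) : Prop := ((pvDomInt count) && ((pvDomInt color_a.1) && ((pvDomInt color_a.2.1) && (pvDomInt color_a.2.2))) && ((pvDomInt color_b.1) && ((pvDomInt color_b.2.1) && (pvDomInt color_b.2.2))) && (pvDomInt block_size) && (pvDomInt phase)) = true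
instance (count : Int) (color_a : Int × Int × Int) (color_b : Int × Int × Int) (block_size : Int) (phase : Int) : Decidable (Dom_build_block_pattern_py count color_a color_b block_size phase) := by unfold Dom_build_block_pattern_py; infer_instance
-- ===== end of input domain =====

-- B replaces A's run-extending block loop (toggle + extend) by a per-index comprehension
-- computing each pixel's block parity as (phase + i // bs) & 1; objective: simpler.


-- ===== PORT A =====
-- while-loop of A, fuel = remaining iterations bound ((count - i).toNat suffices since each
-- run advances i by at least 1 when bs ≥ 1, which build_block_pattern_py guarantees via max 1).
def pvALoop (count bs : Int) (color_a color_b : Int × Int × Int) :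
    Nat → Int → Int → List (Int × Int × Int) → List (Int × Int × Int)
  | fuel, i, toggle, out =>
    if i < count then
      match fuel with
      | 0 => out
      | f + 1 =>
        let color := if toggle ≠ 0 then color_b else color_a
        let run := min bs (count - i)
        pvALoop count bs color_a color_b f (i + run) (PySem.Int.bxor toggle 1)
          (out ++ List.replicate run.toNat color)
    else out

def build_block_pattern_py (count : Int) (color_a : Int × Int × Int) (color_b : Int × Int × Int) (block_size : Int) (phase : Int) : List (Int × Int × Int) :=
  pvALoop count (max 1 block_size) color_a color_b count.toNat 0 (PySem.Int.band phase 1) []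

-- ===== PORT B =====
def build_block_pattern_py_alt (count : Int) (color_a : Int × Int × Int) (color_b : Int × Int × Int) (block_size : Int) (phase : Int) : List (Int × Int × Int) :=
  let bs := max 1 block_size
  (PySem.List.pyRange 0 count 1).map (fun i =>
    if PySem.Int.band (phase + PySem.Int.floordiv i bs) 1 ≠ 0 then color_b else color_a)

-- ===== PRECONDITION & SPEC =====
def Spec_build_block_pattern_py (count : Int) (color_a : Int × Int × Int) (color_b : Int × Int × Int) (block_size : Int) (phase : Int) (out : List (Int × Int × Int)) : Prop := out = build_block_pattern_py_alt count color_a color_b block_size phase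
instance (count : Int) (color_a : Int × Int × Int) (color_b : Int × Int × Int) (block_size : Int) (phase : Int) (out : List (Int × Int × Int)) : Decidable (Spec_build_block_pattern_py count color_a color_b block_size phase out) := by unfold Spec_build_block_pattern_py; infer_instance

-- ===== CLAIM (what is proved, stated in full; the proofs are below) =====
def Claim_equal_build_block_pattern_py : Prop := ∀ (count : Int) (color_a : Int × Int × Int) (color_b : Int × Int × Int) (block_size : Int) (phase : Int), Dom_build_block_pattern_py count color_a color_b block_size phase → Spec_build_block_pattern_py count color_a color_b block_size phase (build_block_pattern_py count color_a color_b block_size phase)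

-- ===== LEMMAS AND PROOFS =====

-- a map that is constant on a one-step range is a replicate
lemma map_const_on_pyRange {α : Type} (f : Int → α) (a b : Int) (c : α)
    (h : ∀ i, a ≤ i → i < b → f i = c) :
    (PySem.List.pyRange a b 1).map f = List.replicate (b - a).toNat c := by
  have hmem : ∀ x ∈ (PySem.List.pyRange a b 1).map f, x = c := by
    intro x hx
    rcases List.mem_map.mp hx with ⟨i, hi, rfl⟩
    rcases (PySem.List.mem_pyRange_one).mp hi with ⟨h1, h2⟩
    exact h i h1 h2
  have hlen : ((PySem.List.pyRange a b 1).map f).length = (b - a).toNat := by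
    simp [PySem.List.length_pyRange_one]
  calc (PySem.List.pyRange a b 1).map f
      = List.replicate ((PySem.List.pyRange a b 1).map f).length c :=
        List.eq_replicate_of_mem hmem
    _ = List.replicate (b - a).toNat c := by rw [hlen]

-- loop invariant: at block boundary i = k*bs with toggle = (phase+k) mod 2,
-- the loop appends exactly B's per-index colors for indices k*bs .. count-1
lemma pvALoop_eq (count bs phase : Int) (ca cb : Int × Int × Int) (hbs : 1 ≤ bs) :
    ∀ (fuel : Nat) (k : Int) (out : List (Int × Int × Int)),
      0 ≤ k → (count - k * bs).toNat ≤ fuel →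
      pvALoop count bs ca cb fuel (k * bs) (PySem.Int.mod (phase + k) 2) out =
        out ++ (PySem.List.pyRange (k * bs) count 1).map
          (fun i => if PySem.Int.band (phase + PySem.Int.floordiv i bs) 1 ≠ 0 then cb else ca) := by
  intro fuel
  induction fuel with
  | zero =>
    intro k out hk hfuel
    have hle : count ≤ k * bs := by omega
    rw [pvALoop]
    simp [not_lt.mpr hle, PySem.List.pyRange_one_eq_nil hle]
  | succ f ih =>
    intro k out hk hfuel
    rw [pvALoop]
    by_cases hlt : k * bs < count
    · simp only [if_pos hlt]
      have hmod : PySem.Int.mod (phase + k) 2 = (phase + k) % 2 :=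
        PySem.Int.mod_eq_emod_of_pos (by omega)
      have hmod01 : (phase + k) % 2 = 0 ∨ (phase + k) % 2 = 1 := by omega
      -- the color of block k matches B's formula on every index of the block
      have hblock : ∀ i, k * bs ≤ i → i < (k + 1) * bs →
          (if PySem.Int.band (phase + PySem.Int.floordiv i bs) 1 ≠ 0 then cb else ca) =
          (if PySem.Int.mod (phase + k) 2 ≠ 0 then cb else ca) := by
        intro i h1 h2
        have hdiv : PySem.Int.floordiv i bs = k :=
          (PySem.Int.floordiv_eq_iff_of_pos (by omega)).mpr ⟨h1, h2⟩
        rw [hdiv, PySem.Int.band_one, hmod]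
      by_cases hrun : count - k * bs ≤ bs
      · -- last (possibly partial) block: run = count - k*bs, loop then exits
        have hmin : min bs (count - k * bs) = count - k * bs := min_eq_right hrun
        have hend : ¬ (k * bs + (count - k * bs) < count) := by omega
        simp only [hmin]
        rw [pvALoop.eq_def]
        simp only [if_neg hend]
        rw [map_const_on_pyRange _ _ _ _
          (fun i h1 h2 => hblock i h1 (by nlinarith))]
      · -- full block: run = bs, recurse at boundary (k+1)*bs
        have hmin : min bs (count - k * bs) = bs := min_eq_left (by omega)
        have hnext : k * bs + bs = (k + 1) * bs := by ring
        have htog : PySem.Int.bxor (PySem.Int.mod (phase + k) 2) 1 =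
            PySem.Int.mod (phase + (k + 1)) 2 := by
          have h2 : PySem.Int.mod (phase + (k + 1)) 2 = (phase + (k + 1)) % 2 :=
            PySem.Int.mod_eq_emod_of_pos (by omega)
          rcases hmod01 with h | h
          · have : (phase + (k + 1)) % 2 = 1 := by omega
            rw [hmod, h, h2, this]; decide
          · have : (phase + (k + 1)) % 2 = 0 := by omega
            rw [hmod, h, h2, this]; decide
        have hfuel' : (count - (k + 1) * bs).toNat ≤ f := by
          have : (k + 1) * bs = k * bs + bs := by ring
          omega
        simp only [hmin, hnext, htog]
        rw [ih (k + 1) _ (by omega) hfuel']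
        rw [PySem.List.pyRange_one_append (k * bs) ((k + 1) * bs) count
              (by nlinarith) (by omega),
            List.map_append, List.append_assoc]
        rw [map_const_on_pyRange _ _ _ _ hblock]
        have : ((k + 1) * bs - k * bs).toNat = bs.toNat := by
          have : (k + 1) * bs = k * bs + bs := by ring
          omega
        rw [this]
    · have hle : count ≤ k * bs := by omega
      simp [hlt, PySem.List.pyRange_one_eq_nil hle]

-- ===== VERDICT (by name: the statement is the Claim_ definition above) =====
theorem build_block_pattern_py_spec : Claim_equal_build_block_pattern_py := by
  intro count ca cb block_size phase _
  unfold Spec_build_block_pattern_py build_block_pattern_py build_block_pattern_py_alt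
  have hbs : 1 ≤ max 1 block_size := le_max_left _ _
  have h0 : PySem.Int.band phase 1 = PySem.Int.mod (phase + 0) 2 := by
    rw [PySem.Int.band_one]; norm_num
  have := pvALoop_eq count (max 1 block_size) phase ca cb hbs count.toNat 0 []
    le_rfl (by omega)
  simp only [zero_mul] at this
  rw [h0, this, List.nil_append]
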